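-- pv_equiv track=rewrite | github.com/Penguinja8/folder-creationi-lol | folder/gridworld.py | processOps
-- ===== SOURCE A (Python) =====
-- def processOps(opers, graph):
--     ops = []
--     for i,char in enumerate(opers):
--         if char == 'B': ops.append('B')
--         elif char == 'T': ops.append('T')
--         elif char == 'R':
--             oop = ""
--             if opers[i-1] == '-': oop += '-'
--             oop += 'R'
--             for c in opers[i+1:]:
--                 if c in "0123456789": oop += c
--                 else: break
--             ops.append(oop)
--     b = None
--     t = None
--     r = None
--     for i in range(len(ops)):
--         if 'B' in ops[i]:
--             b = i
--         if 'T' in ops[i]: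
--             t = i
--         if 'R' in ops[i]:
--             r = i
--     opes = ['no' if b == None else ops[b], 'no' if t == None else ops[t], 'no' if r == None else ops[r]]
--     return opes
-- ===== SOURCE B (Python) =====
-- def processOps(opers, graph):
--     # Three independent right-to-left searches for the last 'B'/'T'/'R';
--     # the operation string is built only for the final 'R', never for earlier ones.
--     def last_index(ch):
--         for i in range(len(opers) - 1, -1, -1):
--             if opers[i] == ch:
--                 return i
--         return None
--
--     b = 'no' if last_index('B') is None else 'B'
--     t = 'no' if last_index('T') is None else 'T'
--     j = last_index('R')
--     if j is None:
--         r = 'no'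
--     else:
--         r = ('-' if opers[j - 1] == '-' else '') + 'R'
--         for c in opers[j + 1:]:
--             if c in '0123456789':
--                 r += c
--             else:
--                 break
--     return [b, t, r]
-- ===== Notes on version B (the rewrite author's own statement) =====
-- stated objective: alternative
-- what changed: B replaces A's forward pass that builds a list of all operation strings plus a second index-scan over that list by three independent right-to-left searches for the last 'B'/'T'/'R', building the R-operation string only once, for the final 'R'.
import Mathlib
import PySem

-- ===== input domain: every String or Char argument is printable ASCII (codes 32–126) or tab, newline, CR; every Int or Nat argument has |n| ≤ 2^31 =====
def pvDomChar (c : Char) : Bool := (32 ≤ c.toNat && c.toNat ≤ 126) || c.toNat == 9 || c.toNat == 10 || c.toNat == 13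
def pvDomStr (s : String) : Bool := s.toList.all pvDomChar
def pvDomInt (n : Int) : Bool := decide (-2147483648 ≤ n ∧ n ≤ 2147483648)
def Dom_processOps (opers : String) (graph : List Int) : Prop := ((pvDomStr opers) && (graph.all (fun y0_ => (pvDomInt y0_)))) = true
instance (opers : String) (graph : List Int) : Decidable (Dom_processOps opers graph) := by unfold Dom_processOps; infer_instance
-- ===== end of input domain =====

-- B replaces A's forward pass (building a list of all operation strings) plus its second
-- index-scan by three independent right-to-left searches for the last 'B'/'T'/'R',
-- building the R-operation string only once; objective: alternative decomposition.

-- ===== PORT A =====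

-- c in "0123456789"
def pvDigitA (c : Char) : Bool := ("0123456789".toList).contains c

-- the string 'oop' A builds for an 'R' at index i: opers[i-1] check (Python negative index:
-- pyGet? with i-1, which wraps to the last char when i = 0), then 'R', then the digit run of
-- opers[i+1:] (the for-with-break over the slice is takeWhile, exact step for step).
def pvOopA (cs : List Char) (i : Int) : String :=
  String.ofList (((if PySem.List.pyGet? cs (i - 1) = some '-' then ['-'] else []) ++ ['R'])
    ++ (PySem.List.slice cs (some (i + 1)) none).takeWhile pvDigitA)

-- body of A's first loop: the branch chain appending to ops
def pvStepOpsA (cs : List Char) (ops : List String) (p : Int × Char) : List String :=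
  if p.2 = 'B' then ops ++ ["B"]
  else if p.2 = 'T' then ops ++ ["T"]
  else if p.2 = 'R' then ops ++ [pvOopA cs p.1]
  else ops

-- body of A's second loop over range(len(ops)): last index whose entry contains 'B'/'T'/'R'
def pvStepIdx (ops : List String) (st : Option Nat × Option Nat × Option Nat) (i : Nat) :
    Option Nat × Option Nat × Option Nat :=
  let si := ops.getD i ""
  (if PySem.Str.isIn "B" si then some i else st.1,
   if PySem.Str.isIn "T" si then some i else st.2.1,
   if PySem.Str.isIn "R" si then some i else st.2.2)

def processOps (opers : String) (graph : List Int) : List String :=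
  let cs := opers.toList
  let ops := (PySem.List.enumerate cs 0).foldl (pvStepOpsA cs) []
  let st := (List.range ops.length).foldl (pvStepIdx ops) (none, none, none)
  [(match st.1 with | none => "no" | some i => ops.getD i ""),
   (match st.2.1 with | none => "no" | some i => ops.getD i ""),
   (match st.2.2 with | none => "no" | some i => ops.getD i "")]

-- ===== PORT B =====

-- c in '0123456789'
def pvDigitB (c : Char) : Bool := ("0123456789".toList).contains c

-- B's last_index: the backward loop 'for i in range(len(opers)-1, -1, -1)', early return;
-- the fuel argument k is the number of indices still to try (k-1 is tried first).
def pvLastIdxGo (cs : List Char) (ch : Char) : Nat → Option Nat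
  | 0 => none
  | k + 1 => if cs[k]? = some ch then some k else pvLastIdxGo cs ch k

def pvLastIdx (cs : List Char) (ch : Char) : Option Nat := pvLastIdxGo cs ch cs.length

def processOps_alt (opers : String) (graph : List Int) : List String :=
  let cs := opers.toList
  let b := match pvLastIdx cs 'B' with | none => "no" | some _ => "B"
  let t := match pvLastIdx cs 'T' with | none => "no" | some _ => "T"
  let r := match pvLastIdx cs 'R' with
    | none => "no"
    | some j =>
        -- ('-' if opers[j-1]=='-' else '') + 'R' + digit run of opers[j+1:]
        String.ofList ((if PySem.List.pyGet? cs ((j : Int) - 1) = some '-' then ['-'] else [])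
          ++ 'R' :: (PySem.List.slice cs (some ((j : Int) + 1)) none).takeWhile pvDigitB)
  [b, t, r]

-- ===== PRECONDITION & SPEC =====
def Spec_processOps (opers : String) (graph : List Int) (out : List String) : Prop := out = processOps_alt opers graph
instance (opers : String) (graph : List Int) (out : List String) : Decidable (Spec_processOps opers graph out) := by unfold Spec_processOps; infer_instance

-- ===== CLAIM (what is proved, stated in full; the proofs are below) =====
def Claim_equal_processOps : Prop := ∀ (opers : String) (graph : List Int), Dom_processOps opers graph → Spec_processOps opers graph (processOps opers graph)

-- ===== LEMMAS AND PROOFS =====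

-- what one enumerate step contributes to A's ops list
def pvG (cs : List Char) (p : Int × Char) : List String :=
  if p.2 = 'B' then ["B"]
  else if p.2 = 'T' then ["T"]
  else if p.2 = 'R' then [pvOopA cs p.1]
  else []

-- A's second loop rephrased on values instead of indices
def pvStepV (st : Option String × Option String × Option String) (x : String) :
    Option String × Option String × Option String :=
  (if PySem.Str.isIn "B" x then some x else st.1,
   if PySem.Str.isIn "T" x then some x else st.2.1,
   if PySem.Str.isIn "R" x then some x else st.2.2)

-- the value fold merged back over the original characters (one step per enumerate pair)
def pvStepM (cs : List Char) (st : Option String × Option String × Option String)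
    (p : Int × Char) : Option String × Option String × Option String :=
  if p.2 = 'B' then (some "B", st.2.1, st.2.2)
  else if p.2 = 'T' then (st.1, some "T", st.2.2)
  else if p.2 = 'R' then (st.1, st.2.1, some (pvOopA cs p.1))
  else st

def pvIdxFold (ops : List String) : Option Nat × Option Nat × Option Nat :=
  (List.range ops.length).foldl (pvStepIdx ops) (none, none, none)

def pvValFold (ops : List String) : Option String × Option String × Option String :=
  ops.foldl pvStepV (none, none, none)

-- last index carried by the 'R' pairs of an enumerate list
def pvLastR (ch : Char) (pairs : List (Int × Char)) (a : Option Int) : Option Int :=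
  pairs.foldl (fun a p => if p.2 = ch then some p.1 else a) a

lemma pvIdxFold_def (ops : List String) :
    (List.range ops.length).foldl (pvStepIdx ops) (none, none, none) = pvIdxFold ops := rfl

lemma pvStepOpsA_eq (cs : List Char) (ops : List String) (p : Int × Char) :
    pvStepOpsA cs ops p = ops ++ pvG cs p := by
  unfold pvStepOpsA pvG
  split_ifs <;> simp

-- characters of an oop string are '-', 'R' or digits
lemma pvOopA_isIn (cs : List Char) (i : Int) :
    PySem.Str.isIn "B" (pvOopA cs i) = false ∧ PySem.Str.isIn "T" (pvOopA cs i) = false ∧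
    PySem.Str.isIn "R" (pvOopA cs i) = true := by
  have hmem : ∀ c : Char, c ∈ (pvOopA cs i).toList →
      c = '-' ∨ c = 'R' ∨ pvDigitA c = true := by
    intro c hc
    unfold pvOopA at hc
    rw [String.toList_ofList] at hc
    simp only [List.mem_append] at hc
    rcases hc with (h | h) | h
    · left; split at h <;> simp_all
    · right; left; simpa using h
    · right; right; exact List.mem_takeWhile_imp h
  refine ⟨?_, ?_, ?_⟩
  · rw [Bool.eq_false_iff]
    intro h
    rw [PySem.Str.isIn_iff_infix] at h
    have : 'B' ∈ (pvOopA cs i).toList := (List.singleton_infix_iff 'B' _).mp h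
    rcases hmem 'B' this with h | h | h <;> simp_all [pvDigitA]
  · rw [Bool.eq_false_iff]
    intro h
    rw [PySem.Str.isIn_iff_infix] at h
    have : 'T' ∈ (pvOopA cs i).toList := (List.singleton_infix_iff 'T' _).mp h
    rcases hmem 'T' this with h | h | h <;> simp_all [pvDigitA]
  · rw [PySem.Str.isIn_iff_infix]
    apply (List.singleton_infix_iff 'R' _).mpr
    unfold pvOopA
    rw [String.toList_ofList]
    simp

-- A's index-selecting second loop computes the same three entries as the value fold,
-- and every stored index is in range.
lemma pvKey (ops : List String) :
    ((pvIdxFold ops).1.map (fun i => ops.getD i "") = (pvValFold ops).1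
      ∧ ∀ j, (pvIdxFold ops).1 = some j → j < ops.length)
    ∧ ((pvIdxFold ops).2.1.map (fun i => ops.getD i "") = (pvValFold ops).2.1
      ∧ ∀ j, (pvIdxFold ops).2.1 = some j → j < ops.length)
    ∧ ((pvIdxFold ops).2.2.map (fun i => ops.getD i "") = (pvValFold ops).2.2
      ∧ ∀ j, (pvIdxFold ops).2.2 = some j → j < ops.length) := by
  induction ops using List.reverseRecOn with
  | nil => simp [pvIdxFold, pvValFold]
  | append_singleton l x ih =>
    have hlen : (l ++ [x]).length = l.length + 1 := by simp
    have hx : (l ++ [x]).getD l.length "" = x := by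
      rw [List.getD_append_right _ _ _ _ le_rfl]; simp
    have hfold : pvIdxFold (l ++ [x]) = pvStepIdx (l ++ [x]) (pvIdxFold l) l.length := by
      unfold pvIdxFold
      rw [hlen, List.range_succ, List.foldl_append, List.foldl_cons, List.foldl_nil]
      have hc : (List.range l.length).foldl (pvStepIdx (l ++ [x])) (none, none, none)
          = (List.range l.length).foldl (pvStepIdx l) (none, none, none) := by
        apply PySem.List.foldl_congr_mem
        intro acc i hi
        have hi' : i < l.length := List.mem_range.mp hi
        unfold pvStepIdx
        rw [List.getD_append _ _ _ _ hi']
      rw [hc]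
    have hval : pvValFold (l ++ [x]) = pvStepV (pvValFold l) x := by
      unfold pvValFold
      rw [List.foldl_append]
      rfl
    obtain ⟨⟨h1, b1⟩, ⟨h2, b2⟩, ⟨h3, b3⟩⟩ := ih
    have hgd : ∀ j, j < l.length → (l ++ [x])[j]? = l[j]? := by
      intro j hj; exact List.getElem?_append_left hj
    rw [hfold, hval]
    unfold pvStepIdx pvStepV
    rw [hx]
    refine ⟨⟨?_, ?_⟩, ⟨?_, ?_⟩, ⟨?_, ?_⟩⟩ <;> simp only
    · split
      · simp
      · rw [← h1]
        cases hopt : (pvIdxFold l).1 with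
        | none => rfl
        | some j => simp [List.getD, hgd j (b1 j hopt)]
    · intro j hj
      split at hj
      · simp at hj; omega
      · have := b1 j hj; omega
    · split
      · simp
      · rw [← h2]
        cases hopt : (pvIdxFold l).2.1 with
        | none => rfl
        | some j => simp [List.getD, hgd j (b2 j hopt)]
    · intro j hj
      split at hj
      · simp at hj; omega
      · have := b2 j hj; omega
    · split
      · simp
      · rw [← h3]
        cases hopt : (pvIdxFold l).2.2 with
        | none => rfl
        | some j => simp [List.getD, hgd j (b3 j hopt)]
    · intro j hj
      split at hj
      · simp at hj; omega
      · have := b3 j hj; omega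

-- folding the value step over one step's contribution is the merged step
lemma pvStepV_g (cs : List Char) (st : Option String × Option String × Option String)
    (p : Int × Char) : (pvG cs p).foldl pvStepV st = pvStepM cs st p := by
  unfold pvG pvStepM
  obtain ⟨h1, h2, h3⟩ := pvOopA_isIn cs p.1
  simp only [PySem.Str.isIn, show "B".toList = ['B'] from by decide,
    show "T".toList = ['T'] from by decide, show "R".toList = ['R'] from by decide] at h1 h2 h3
  have eBB : PySem.Chars.isIn ['B'] ['B'] = true := by decide
  have eTB : PySem.Chars.isIn ['T'] ['B'] = false := by decide
  have eRB : PySem.Chars.isIn ['R'] ['B'] = false := by decide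
  have eBT : PySem.Chars.isIn ['B'] ['T'] = false := by decide
  have eTT : PySem.Chars.isIn ['T'] ['T'] = true := by decide
  have eRT : PySem.Chars.isIn ['R'] ['T'] = false := by decide
  split_ifs <;>
    simp [pvStepV, eBB, eTB, eRB, eBT, eTT, eRT, h1, h2, h3]

lemma pvValFold_flatMap (cs : List Char) :
    ∀ (pairs : List (Int × Char)) (st : Option String × Option String × Option String),
      (pairs.flatMap (pvG cs)).foldl pvStepV st = pairs.foldl (pvStepM cs) st := by
  intro pairs
  induction pairs with
  | nil => intro st; rfl
  | cons p ps ih =>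
    intro st
    rw [List.flatMap_cons, List.foldl_append, pvStepV_g, List.foldl_cons, ih]

-- components of the merged fold over an arbitrary pair list
lemma pvFoldM_fst (cs : List Char) :
    ∀ (pairs : List (Int × Char)) (st : Option String × Option String × Option String),
      (pairs.foldl (pvStepM cs) st).1
        = if pairs.any (fun p => p.2 = 'B') then some "B" else st.1 := by
  intro pairs
  induction pairs with
  | nil => intro st; simp
  | cons p ps ih =>
    intro st
    rw [List.foldl_cons, ih]
    simp only [List.any_cons]
    unfold pvStepM
    split_ifs <;> simp_all

lemma pvFoldM_snd (cs : List Char) :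
    ∀ (pairs : List (Int × Char)) (st : Option String × Option String × Option String),
      (pairs.foldl (pvStepM cs) st).2.1
        = if pairs.any (fun p => p.2 = 'T') then some "T" else st.2.1 := by
  intro pairs
  induction pairs with
  | nil => intro st; simp
  | cons p ps ih =>
    intro st
    rw [List.foldl_cons, ih]
    simp only [List.any_cons]
    unfold pvStepM
    split_ifs <;> simp_all

lemma pvFoldM_thd (cs : List Char) :
    ∀ (pairs : List (Int × Char)) (st : Option String × Option String × Option String)
      (a : Option Int), st.2.2 = a.map (pvOopA cs) →
      (pairs.foldl (pvStepM cs) st).2.2 = (pvLastR 'R' pairs a).map (pvOopA cs) := by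
  intro pairs
  induction pairs with
  | nil => intro st a h; simpa [pvLastR] using h
  | cons p ps ih =>
    intro st a h
    rw [List.foldl_cons]
    by_cases hR : p.2 = 'R'
    · have : (pvStepM cs st p).2.2 = (some p.1).map (pvOopA cs) := by
        by_cases hB : p.2 = 'B' <;> by_cases hT : p.2 = 'T' <;>
          simp_all [pvStepM]
      rw [ih _ _ this]
      simp [pvLastR, hR]
    · have : (pvStepM cs st p).2.2 = a.map (pvOopA cs) := by
        by_cases hB : p.2 = 'B' <;> by_cases hT : p.2 = 'T' <;>
          simp_all [pvStepM]
      rw [ih _ _ this]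
      simp [pvLastR, hR]

-- peeling one character off the front of a backward scan
lemma pvLastIdxGo_cons (c : Char) (cs : List Char) (ch : Char) :
    ∀ n, pvLastIdxGo (c :: cs) ch (n + 1)
      = match pvLastIdxGo cs ch n with
        | some j => some (j + 1)
        | none => if c = ch then some 0 else none := by
  intro n
  induction n with
  | zero => simp [pvLastIdxGo]
  | succ n ih =>
    show (if (c :: cs)[n + 1]? = some ch then some (n + 1) else pvLastIdxGo (c :: cs) ch (n + 1)) = _
    rw [ih]
    simp only [List.getElem?_cons_succ, pvLastIdxGo]
    by_cases h : cs[n]? = some ch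
    · simp [h]
    · simp [h]

-- B's backward scan finds the index stored by A's forward last-wins fold
lemma pvLastR_enumerate (ch : Char) :
    ∀ (cs : List Char) (k : Int) (a : Option Int),
      pvLastR ch (PySem.List.enumerate cs k) a
        = match pvLastIdxGo cs ch cs.length with
          | some j => some (k + j)
          | none => a := by
  intro cs
  induction cs with
  | nil => intro k a; simp [pvLastR, PySem.List.enumerate_nil, pvLastIdxGo]
  | cons c cs ih =>
    intro k a
    rw [PySem.List.enumerate_cons]
    have hstep : pvLastR ch ((k, c) :: PySem.List.enumerate cs (k + 1)) a
        = pvLastR ch (PySem.List.enumerate cs (k + 1)) (if c = ch then some k else a) := rfl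
    rw [hstep, ih]
    simp only [List.length_cons, pvLastIdxGo_cons]
    cases h : pvLastIdxGo cs ch cs.length with
    | some j =>
      simp only
      congr 1
      push_cast
      ring
    | none => by_cases hc : c = ch <;> simp [hc]

-- B's backward scan succeeds iff the character occurs
lemma pvAny_enumerate (ch : Char) :
    ∀ (cs : List Char) (k : Int),
      (PySem.List.enumerate cs k).any (fun p => p.2 = ch)
        = (pvLastIdxGo cs ch cs.length).isSome := by
  intro cs
  induction cs with
  | nil => intro k; simp [PySem.List.enumerate_nil, pvLastIdxGo]
  | cons c cs ih =>
    intro k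
    rw [PySem.List.enumerate_cons]
    simp only [List.any_cons, ih (k + 1), List.length_cons, pvLastIdxGo_cons]
    cases h : pvLastIdxGo cs ch cs.length with
    | some j => simp
    | none => by_cases hc : c = ch <;> simp [hc]

-- the oop string written the way B's port writes it
lemma pvOopA_eq_alt (cs : List Char) (j : Nat) :
    pvOopA cs (j : Int)
      = String.ofList ((if PySem.List.pyGet? cs ((j : Int) - 1) = some '-' then ['-'] else [])
          ++ 'R' :: (PySem.List.slice cs (some ((j : Int) + 1)) none).takeWhile pvDigitB) := by
  unfold pvOopA
  rw [show pvDigitA = pvDigitB from rfl]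
  simp

-- ===== VERDICT (by name: the statement is the Claim_ definition above) =====
theorem processOps_spec : Claim_equal_processOps := by
  intro opers graph _
  unfold Spec_processOps processOps processOps_alt
  simp only
  have hops : (PySem.List.enumerate opers.toList 0).foldl (pvStepOpsA opers.toList) []
      = (PySem.List.enumerate opers.toList 0).flatMap (pvG opers.toList) := by
    rw [PySem.List.foldl_congr_mem _ _ (fun ops p => ops ++ pvG opers.toList p) _
      (fun acc x _ => pvStepOpsA_eq opers.toList acc x)]
    rw [PySem.List.foldl_append_eq_flatMap]
    simp
  rw [hops, pvIdxFold_def]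
  obtain ⟨⟨h1, _⟩, ⟨h2, _⟩, ⟨h3, _⟩⟩ :=
    pvKey ((PySem.List.enumerate opers.toList 0).flatMap (pvG opers.toList))
  have hv : pvValFold ((PySem.List.enumerate opers.toList 0).flatMap (pvG opers.toList))
      = (PySem.List.enumerate opers.toList 0).foldl (pvStepM opers.toList)
          (none, none, none) := by
    unfold pvValFold
    rw [pvValFold_flatMap]
  have e1 := pvFoldM_fst opers.toList (PySem.List.enumerate opers.toList 0) (none, none, none)
  have e2 := pvFoldM_snd opers.toList (PySem.List.enumerate opers.toList 0) (none, none, none)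
  have e3 := pvFoldM_thd opers.toList (PySem.List.enumerate opers.toList 0) (none, none, none)
    none rfl
  rw [← hv] at e1 e2 e3
  rw [pvAny_enumerate] at e1 e2
  rw [pvLastR_enumerate 'R' opers.toList 0 none] at e3
  rw [← h1] at e1
  rw [← h2] at e2
  rw [← h3] at e3
  congr 1
  · -- the 'B' component
    simp only [pvLastIdx]
    cases hA : (pvIdxFold ((PySem.List.enumerate opers.toList 0).flatMap (pvG opers.toList))).1 with
    | none =>
      rw [hA] at e1
      cases hB : pvLastIdxGo opers.toList 'B' opers.toList.length with
      | none => rfl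
      | some j => rw [hB] at e1; simp at e1
    | some i =>
      rw [hA] at e1
      cases hB : pvLastIdxGo opers.toList 'B' opers.toList.length with
      | none => rw [hB] at e1; simp at e1
      | some j => rw [hB] at e1; simp at e1; simp [e1]
  congr 1
  · -- the 'T' component
    simp only [pvLastIdx]
    cases hA : (pvIdxFold ((PySem.List.enumerate opers.toList 0).flatMap (pvG opers.toList))).2.1 with
    | none =>
      rw [hA] at e2
      cases hB : pvLastIdxGo opers.toList 'T' opers.toList.length with
      | none => rfl
      | some j => rw [hB] at e2; simp at e2
    | some i =>
      rw [hA] at e2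
      cases hB : pvLastIdxGo opers.toList 'T' opers.toList.length with
      | none => rw [hB] at e2; simp at e2
      | some j => rw [hB] at e2; simp at e2; simp [e2]
  congr 1
  · -- the 'R' component
    simp only [pvLastIdx]
    cases hA : (pvIdxFold ((PySem.List.enumerate opers.toList 0).flatMap (pvG opers.toList))).2.2 with
    | none =>
      rw [hA] at e3
      cases hB : pvLastIdxGo opers.toList 'R' opers.toList.length with
      | none => rfl
      | some j => rw [hB] at e3; simp at e3
    | some i =>
      rw [hA] at e3
      cases hB : pvLastIdxGo opers.toList 'R' opers.toList.length with
      | none => rw [hB] at e3; simp at e3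
      | some j =>
        rw [hB] at e3
        simp at e3
        simp [List.getD, e3, pvOopA_eq_alt]
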